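-- pv_equiv track=rewrite | github.com/balamanikantsai/Compass_GenAI_Hackathon | app/career_advisor/routes.py | _enforce_single_question
-- ===== SOURCE A (Python) =====
-- def _enforce_single_question(text: str) -> str:
--     try:
--         if not text:
--             return text
--         used = False
--         out = []
--         buf = []
--         for ch in text:
--             if ch == '?':
--                 if not used:
--                     used = True
--                     buf.append('?')
--                 else:
--                     buf.append('.')
--             else:
--                 buf.append(ch)
--         out = ''.join(buf)
--         return out
--     except Exception:
--         return text
-- ===== SOURCE B (Python) =====
-- def _enforce_single_question(text: str) -> str:
--     try:
--         if not text:
--             return text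
--         idx = text.find('?')
--         if idx == -1:
--             return text
--         return text[:idx + 1] + text[idx + 1:].replace('?', '.')
--     except Exception:
--         return text
-- ===== Notes on version B (the rewrite author's own statement) =====
-- stated objective: simpler
-- what changed: Replaced the stateful char-by-char accumulator loop with a single find of the first question mark plus one bulk str.replace on the remainder of the string.
import Mathlib
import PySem

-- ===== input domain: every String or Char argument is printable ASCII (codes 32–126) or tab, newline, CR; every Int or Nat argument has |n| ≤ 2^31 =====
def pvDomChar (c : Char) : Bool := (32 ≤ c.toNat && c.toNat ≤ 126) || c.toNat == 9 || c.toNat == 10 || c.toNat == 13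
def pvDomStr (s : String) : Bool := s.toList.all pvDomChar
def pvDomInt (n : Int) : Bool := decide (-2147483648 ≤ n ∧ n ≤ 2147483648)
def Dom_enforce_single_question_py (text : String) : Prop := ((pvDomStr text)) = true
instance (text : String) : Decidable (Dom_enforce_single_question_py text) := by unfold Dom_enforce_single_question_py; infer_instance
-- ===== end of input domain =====

-- B replaces A's char-by-char loop with a stateful flag by find-first-'?' plus a bulk replace on the remainder (objective: simpler).

-- ===== PORT A =====
-- the for-loop over text with the (used, buf) state, as a foldl
def enforce_single_question_py (text : String) : String :=
  if text = "" then text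
  else
    let st := text.toList.foldl
      (fun (s : Bool × List Char) ch =>
        if ch = '?' then
          if s.1 = false then (true, s.2 ++ ['?'])
          else (s.1, s.2 ++ ['.'])
        else (s.1, s.2 ++ [ch]))
      (false, ([] : List Char))
    String.ofList st.2

-- ===== PORT B =====
def enforce_single_question_py_alt (text : String) : String :=
  if text = "" then text
  else
    let idx := PySem.Str.find text "?"
    if idx = -1 then text
    else
      PySem.Str.slice text none (some (idx + 1)) ++
        PySem.Str.replace (PySem.Str.slice text (some (idx + 1)) none) "?" "."

-- ===== PRECONDITION & SPEC =====
def Spec_enforce_single_question_py (text : String) (out : String) : Prop := out = enforce_single_question_py_alt text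
instance (text : String) (out : String) : Decidable (Spec_enforce_single_question_py text out) := by unfold Spec_enforce_single_question_py; infer_instance

-- ===== CLAIM (what is proved, stated in full; the proofs are below) =====
def Claim_equal_enforce_single_question_py : Prop := ∀ (text : String), Dom_enforce_single_question_py text → Spec_enforce_single_question_py text (enforce_single_question_py text)

-- ===== LEMMAS AND PROOFS =====

def pvStep : Bool × List Char → Char → Bool × List Char :=
  fun s ch =>
    if ch = '?' then
      if s.1 = false then (true, s.2 ++ ['?'])
      else (s.1, s.2 ++ ['.'])
    else (s.1, s.2 ++ [ch])

def pvF (c : Char) : Char := if c = '?' then '.' else c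

lemma pvFold_true (cs : List Char) : ∀ acc : List Char,
    cs.foldl pvStep (true, acc) = (true, acc ++ cs.map pvF) := by
  induction cs with
  | nil => simp
  | cons c t ih =>
    intro acc
    by_cases h : c = '?' <;> simp [pvStep, h, pvF, ih]

lemma pvFold_false_no_q (cs : List Char) (h : '?' ∉ cs) : ∀ acc : List Char,
    cs.foldl pvStep (false, acc) = (false, acc ++ cs) := by
  induction cs with
  | nil => simp
  | cons c t ih =>
    intro acc
    simp only [List.mem_cons, not_or] at h
    have hc : c ≠ '?' := fun hc => h.1 hc.symm
    simp [pvStep, hc, ih h.2]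

lemma pvReplace_go_single (fuel : ℕ) : ∀ (l acc : List Char), l.length ≤ fuel →
    PySem.Chars.replace.go ['?'] ['.'] fuel l acc = acc.reverse ++ l.map pvF := by
  induction fuel with
  | zero =>
    intro l acc h
    have : l = [] := List.eq_nil_of_length_eq_zero (Nat.le_zero.mp h)
    subst this; simp [PySem.Chars.replace.go]
  | succ n ih =>
    intro l acc h
    cases l with
    | nil => simp [PySem.Chars.replace.go]
    | cons c t =>
      by_cases hc : c = '?'
      · subst hc
        have : List.isPrefixOf ['?'] ('?' :: t) = true := by simp [List.isPrefixOf]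
        simp only [PySem.Chars.replace.go, this, if_pos]
        rw [show List.drop (['?'] : List Char).length ('?' :: t) = t from rfl,
          ih t _ (by simpa using Nat.le_of_succ_le_succ h)]
        simp [pvF]
      · have : List.isPrefixOf ['?'] (c :: t) = false := by
          simp only [List.isPrefixOf, Bool.and_eq_false_iff, beq_eq_false_iff_ne, ne_eq]
          exact Or.inl fun h' => hc h'.symm
        simp only [PySem.Chars.replace.go, this]
        rw [if_neg (by simp), ih t _ (by simpa using Nat.le_of_succ_le_succ h)]
        simp [pvF, hc]

lemma pvReplace_single (l : List Char) :
    PySem.Chars.replace l ['?'] ['.'] = l.map pvF := by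
  simp only [PySem.Chars.replace, List.isEmpty_cons]
  exact pvReplace_go_single l.length l [] le_rfl

lemma pvNoQ_of_find_neg (cs : List Char) (h : PySem.Chars.find cs ['?'] = -1) :
    '?' ∉ cs := by
  intro hmem
  obtain ⟨pre, suf, rfl⟩ := List.append_of_mem hmem
  exact ((PySem.Chars.find_eq_neg_one_iff _ _).mp h) ⟨pre, suf, by simp⟩

-- ===== VERDICT (by name: the statement is the Claim_ definition above) =====

theorem enforce_single_question_py_spec : Claim_equal_enforce_single_question_py := by
  intro text _
  unfold Spec_enforce_single_question_py enforce_single_question_py enforce_single_question_py_alt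
  by_cases he : text = ""
  · simp [he]
  · simp only [if_neg he]
    have hfind : PySem.Str.find text "?" = PySem.Chars.find text.toList ['?'] := by
      simp [PySem.Str.find_eq]
    by_cases hneg : PySem.Str.find text "?" = -1
    · -- no '?': A reproduces the string
      have hno : '?' ∉ text.toList := pvNoQ_of_find_neg _ (hfind ▸ hneg)
      simp only [if_pos hneg]
      rw [show (fun (s : Bool × List Char) ch =>
        if ch = '?' then
          if s.1 = false then (true, s.2 ++ ['?'])
          else (s.1, s.2 ++ ['.'])
        else (s.1, s.2 ++ [ch])) = pvStep from rfl]
      rw [pvFold_false_no_q _ hno []]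
      simp [String.ofList_toList]
    · -- '?' at index i
      set n := PySem.Chars.find text.toList ['?'] with hn
      have hnne : n ≠ -1 := hfind ▸ hneg
      have hpos : 0 ≤ n := by
        have := PySem.Chars.neg_one_le_find (s := text.toList) (sub := ['?'])
        omega
      obtain ⟨hpre, hmin⟩ := PySem.Chars.find_spec (s := text.toList) (sub := ['?']) hpos
      set i := n.toNat with hi
      have hget : text.toList.drop i = '?' :: text.toList.drop (i + 1) := by
        obtain ⟨t, ht⟩ := hpre
        rw [← ht]
        have h2 : t = text.toList.drop (i + 1) := by
          have := congrArg (List.drop 1) ht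
          simpa [List.drop_drop, Nat.add_comm] using this
        simp [h2]
      have hlen : i < text.toList.length := by
        by_contra hge
        rw [List.drop_eq_nil_of_le (Nat.le_of_not_lt hge)] at hget
        exact (List.cons_ne_nil _ _ hget.symm).elim
      have hnoq : '?' ∉ text.toList.take i := by
        intro hmem
        obtain ⟨j, hj, hjget⟩ := List.mem_iff_getElem.mp hmem
        have hjlt : j < i := lt_of_lt_of_le hj (by simp [List.length_take])
        have hjlen : j < text.toList.length := lt_of_lt_of_le hjlt (Nat.le_of_lt hlen)
        have hq : text.toList[j] = '?' := by
          rw [List.getElem_take] at hjget; exact hjget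
        apply hmin j hjlt
        exact ⟨text.toList.drop (j + 1), by
          rw [List.drop_eq_getElem_cons hjlen, hq]; simp⟩
      simp only [if_neg hneg]
      -- evaluate A via split at i
      have hsplit : text.toList = text.toList.take i ++ '?' :: text.toList.drop (i + 1) := by
        conv_lhs => rw [← List.take_append_drop i text.toList]
        rw [hget]
      rw [show (fun (s : Bool × List Char) ch =>
        if ch = '?' then
          if s.1 = false then (true, s.2 ++ ['?'])
          else (s.1, s.2 ++ ['.'])
        else (s.1, s.2 ++ [ch])) = pvStep from rfl]
      conv_lhs => rw [hsplit]
      rw [List.foldl_append, pvFold_false_no_q _ hnoq, List.foldl_cons]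
      have hstep : pvStep (false, [] ++ text.toList.take i) '?' = (true, text.toList.take i ++ ['?']) := by
        simp [pvStep]
      rw [hstep, pvFold_true]
      -- evaluate B
      apply String.ext
      simp only [String.toList_append, PySem.Str.toList_slice, PySem.Str.toList_replace]
      have hidx1 : n + 1 = ((i + 1 : ℕ) : ℤ) := by omega
      rw [show ("?".toList) = ['?'] from rfl, show (".".toList) = ['.'] from rfl,
        hfind, hidx1, PySem.Chars.slice_eq_listSlice, PySem.Chars.slice_eq_listSlice,
        PySem.List.slice_to_natCast, PySem.List.slice_from_natCast, pvReplace_single]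
      have hq : text.toList[i] = '?' := by
        have h2 := hget
        rw [List.drop_eq_getElem_cons hlen] at h2
        exact (List.cons_eq_cons.mp h2.symm).1.symm
      have htake : text.toList.take (i + 1) = text.toList.take i ++ ['?'] := by
        rw [List.take_add_one]
        simp [List.getElem?_eq_getElem hlen, hq]
      rw [htake]
      simp
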